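-- pv_equiv track=rewrite | github.com/itintegraf-IT/appintegraf | docs/IG.exe_extracted/Kontrola_IGT_Sazka.py | Deleni3
-- ===== SOURCE A (Python) =====
-- def Deleni3(line):  # dělení čísel po 3
--     i = 1;
--     line3 = ""
--     for a in line[::-1]:
--         if i == 3: a = a + " "; i = 0
--         i = i + 1;
--         line3 = line3 + a
--     line4 = line3[::-1]  # revers
--     return (line4)
-- ===== SOURCE B (Python) =====
-- def Deleni3(line):  # dělení čísel po 3
--     n = len(line)
--     out = []
--     for idx, ch in enumerate(line):
--         if (n - idx) % 3 == 0:
--             out.append(" ")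
--         out.append(ch)
--     return "".join(out)
-- ===== Notes on version B (the rewrite author's own statement) =====
-- stated objective: simpler
-- what changed: Single forward pass that inserts a space exactly where (len(line)-idx) %% 3 == 0, replacing A's reverse / 1-2-3 counter / re-reverse strategy.
import Mathlib
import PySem

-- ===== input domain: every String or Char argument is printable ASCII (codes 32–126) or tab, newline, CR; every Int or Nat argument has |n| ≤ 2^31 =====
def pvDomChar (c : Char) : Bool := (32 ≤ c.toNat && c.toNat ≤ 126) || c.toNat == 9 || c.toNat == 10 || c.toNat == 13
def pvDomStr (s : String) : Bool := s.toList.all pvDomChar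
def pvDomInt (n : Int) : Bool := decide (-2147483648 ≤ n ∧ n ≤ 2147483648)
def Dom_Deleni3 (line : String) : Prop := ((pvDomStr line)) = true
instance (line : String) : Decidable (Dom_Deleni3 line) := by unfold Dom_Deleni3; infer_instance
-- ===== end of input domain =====

-- B replaces A's reverse / 1-2-3 counter / re-reverse with one forward pass inserting a
-- space where (len(line) - idx) % 3 == 0 (objective: simpler).

-- ===== PORT A =====
-- loop body of A: state (i, line3); 'a = a + " "' when i == 3, counter reset, append to line3
def pvStepA (st : Int × List Char) (a : Char) : Int × List Char :=
  let aCs : List Char := if st.1 == 3 then [a, ' '] else [a]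
  let i' : Int := (if st.1 == 3 then 0 else st.1) + 1
  (i', st.2 ++ aCs)

-- line[::-1] is ported as List.reverse of the characters (exact for the string slice [::-1])
def Deleni3 (line : String) : String :=
  let r := line.toList.reverse
  let res := r.foldl pvStepA (1, [])
  String.ofList res.2.reverse

-- ===== PORT B =====
-- loop body of B: append ' ' when (n - idx) % 3 == 0, then append the character
def pvStepB (n : Int) (acc : List Char) (p : Int × Char) : List Char :=
  (if PySem.Int.mod (n - p.1) 3 == 0 then acc ++ [' '] else acc) ++ [p.2]

def Deleni3_alt (line : String) : String :=
  let n : Int := line.toList.length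
  let out := (PySem.List.enumerate line.toList).foldl (pvStepB n) []
  String.ofList out

-- ===== PRECONDITION & SPEC =====
def Spec_Deleni3 (line : String) (out : String) : Prop := out = Deleni3_alt line
instance (line : String) (out : String) : Decidable (Spec_Deleni3 line out) := by unfold Spec_Deleni3; infer_instance

-- ===== CLAIM (what is proved, stated in full; the proofs are below) =====
def Claim_equal_Deleni3 : Prop := ∀ (line : String), Dom_Deleni3 line → Spec_Deleni3 line (Deleni3 line)

-- ===== LEMMAS AND PROOFS =====

-- A's fold, with the accumulator peeled off
def bodyA : Int → List Char → List Char
  | _, [] => []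
  | i, a :: rest => (if i = 3 then [a, ' '] else [a]) ++ bodyA ((if i = 3 then 0 else i) + 1) rest

theorem foldA_acc (r : List Char) : ∀ (i : Int) (acc : List Char),
    (r.foldl pvStepA (i, acc)).2 = acc ++ bodyA i r := by
  induction r with
  | nil => intro i acc; simp [bodyA]
  | cons a rest ih =>
    intro i acc
    simp only [List.foldl_cons, pvStepA, bodyA, beq_iff_eq]
    rw [ih]
    simp

-- A's counter in Nat form: j characters already consumed
def bodyG : Nat → List Char → List Char
  | _, [] => []
  | j, a :: rest => a :: (if (j + 1) % 3 = 0 then [' '] else []) ++ bodyG (j + 1) rest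

theorem bodyA_eq_bodyG (r : List Char) : ∀ (j : Nat),
    bodyA ((j % 3 : Nat) + 1) r = bodyG j r := by
  induction r with
  | nil => intro j; simp [bodyA, bodyG]
  | cons a rest ih =>
    intro j
    simp only [bodyA, bodyG]
    by_cases h : j % 3 = 2
    · have hc : (((j % 3 : Nat) : Int) + 1 = 3) := by omega
      rw [if_pos hc, if_pos hc]
      have hrec : bodyA (0 + 1) rest = bodyG (j + 1) rest := by
        have h0 : (((j + 1) % 3 : Nat) : Int) = 0 := by omega
        have := ih (j + 1)
        rw [h0] at this
        exact this
      rw [hrec, if_pos (show (j + 1) % 3 = 0 by omega)]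
    · have hc : ¬ (((j % 3 : Nat) : Int) + 1 = 3) := by omega
      rw [if_neg hc, if_neg hc]
      have hstep : (((j % 3 : Nat) : Int) + 1 + 1) = (((j + 1) % 3 : Nat) : Int) + 1 := by omega
      rw [hstep, ih (j + 1), if_neg (show ¬ ((j + 1) % 3 = 0) by omega)]

-- B's fold, with the accumulator peeled off
def bodyB (n : Int) : List (Int × Char) → List Char
  | [] => []
  | p :: rest => (if PySem.Int.mod (n - p.1) 3 = 0 then [' ', p.2] else [p.2]) ++ bodyB n rest

theorem foldB_acc (n : Int) (ps : List (Int × Char)) : ∀ (acc : List Char),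
    ps.foldl (pvStepB n) acc = acc ++ bodyB n ps := by
  induction ps with
  | nil => intro acc; simp [bodyB]
  | cons p rest ih =>
    intro acc
    simp only [List.foldl_cons, pvStepB, bodyB, beq_iff_eq]
    rw [ih]
    split_ifs <;> simp

theorem bodyB_append (n : Int) (ps qs : List (Int × Char)) :
    bodyB n (ps ++ qs) = bodyB n ps ++ bodyB n qs := by
  induction ps with
  | nil => simp [bodyB]
  | cons p rest ih => simp [bodyB, ih]

-- main bridge: A's reversed-counter output, reversed back, is B's forward output
theorem bridge (r : List Char) : ∀ (j : Nat) (n : Int), n = j + r.length →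
    (bodyG j r).reverse = bodyB n (PySem.List.enumerate r.reverse) := by
  induction r with
  | nil => intro j n _; simp [bodyG, bodyB]
  | cons a rest ih =>
    intro j n hn
    have hrev : (a :: rest).reverse = rest.reverse ++ [a] := by simp
    have henum : PySem.List.enumerate ((a :: rest).reverse)
        = PySem.List.enumerate rest.reverse ++ [((rest.length : Int), a)] := by
      rw [hrev, PySem.List.enumerate_append]
      simp [PySem.List.enumerate_cons, PySem.List.enumerate_nil]
    rw [henum, bodyB_append]
    have hn' : n = (j + 1) + rest.length := by simp at hn ⊢; omega
    rw [← ih (j + 1) n hn']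
    have hsub : n - (rest.length : Int) = ((j + 1 : Nat) : Int) := by
      simp at hn; omega
    simp only [bodyG, bodyB, hsub]
    rw [PySem.Int.mod_eq_emod_of_pos (by norm_num : (0:Int) < 3)]
    by_cases h : (j + 1) % 3 = 0
    · rw [if_pos (show (((j + 1 : Nat) : Int)) % 3 = 0 by omega), if_pos h]
      simp
    · rw [if_neg (show ¬ ((((j + 1 : Nat) : Int)) % 3 = 0) by omega), if_neg h]
      simp

-- ===== VERDICT (by name: the statement is the Claim_ definition above) =====
theorem Deleni3_spec : Claim_equal_Deleni3 := by
  intro line _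
  show Deleni3 line = Deleni3_alt line
  unfold Deleni3 Deleni3_alt
  simp only [foldA_acc, foldB_acc, List.nil_append]
  have h1 : bodyA 1 line.toList.reverse = bodyG 0 line.toList.reverse := by
    have := bodyA_eq_bodyG line.toList.reverse 0
    simpa using this
  rw [h1]
  have h2 := bridge line.toList.reverse 0 (line.toList.length) (by simp)
  simp only [List.reverse_reverse] at h2
  rw [h2]
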